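-- pv_equiv track=rewrite | github.com/MrBrantCode/unitest_baseline | mut_generate/mist_train_cf/cf_103726/solution.py | get_same_letter_words
-- ===== SOURCE A (Python) =====
-- def get_same_letter_words(word_list):
--     same_letter_words = set()
--     for word in word_list:
--         letters = list(word)
--         for i in range(len(letters) - 2):
--             for j in range(i + 2, len(letters)):
--                 same_letters = letters[i:j+1]
--                 if len(set(same_letters)) == 1:
--                     same_letter_words.add(''.join(same_letters))
--     return sorted(list(same_letter_words))
-- ===== SOURCE B (Python) =====
-- def get_same_letter_words(word_list):
--     found = set()
--     for word in word_list:
--         i, n = 0, len(word)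
--         while i < n:
--             j = i + 1
--             while j < n and word[j] == word[i]:
--                 j += 1
--             for k in range(3, j - i + 1):
--                 found.add(word[i] * k)
--             i = j
--     return sorted(found)
-- ===== Notes on version B (the rewrite author's own statement) =====
-- stated objective: faster
-- what changed: B replaces A's per-word triple loop over all (i,j) substring windows (each checked by building a set of its letters) with a single left-to-right scan over maximal same-letter runs that emits each repeated-letter string of length 3..runlength directly.
import Mathlib
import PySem

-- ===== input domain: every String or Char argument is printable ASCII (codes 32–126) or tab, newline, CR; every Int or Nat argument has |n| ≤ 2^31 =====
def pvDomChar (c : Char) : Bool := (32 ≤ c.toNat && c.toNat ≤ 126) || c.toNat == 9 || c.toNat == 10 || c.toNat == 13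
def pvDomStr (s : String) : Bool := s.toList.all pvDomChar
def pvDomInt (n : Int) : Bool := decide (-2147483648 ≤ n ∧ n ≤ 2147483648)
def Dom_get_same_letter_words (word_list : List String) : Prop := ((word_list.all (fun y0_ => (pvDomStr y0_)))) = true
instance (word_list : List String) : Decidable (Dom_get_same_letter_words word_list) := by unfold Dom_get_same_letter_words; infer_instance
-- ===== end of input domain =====

-- B replaces A's cubic all-substring scan per word by a single left-to-right scan over maximal
-- same-letter runs, emitting each repeated-letter string of length 3..runlength once (objective: faster).

-- ===== PORT A =====
def get_same_letter_words (word_list : List String) : List String :=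
  let s : PySem.Set String :=
    word_list.foldl (fun same_letter_words word =>
      let letters := word.toList
      (PySem.List.pyRange 0 ((letters.length : Int) - 2) 1).foldl (fun s1 i =>
        (PySem.List.pyRange (i + 2) (letters.length : Int) 1).foldl (fun s2 j =>
          let same_letters := PySem.List.slice letters (some i) (some (j + 1))
          if (PySem.Set.ofList same_letters).length = 1 then
            PySem.Set.add s2 (String.ofList same_letters)
          else s2) s1) same_letter_words) PySem.Set.empty
  PySem.List.sorted s (fun x => x) false

-- ===== PORT B =====
-- inner `while j < n and word[j] == word[i]` of Source B: counts the chars equal to c at the front,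
-- returns (count, rest)
def pvTakeRun (c : Char) : List Char → Nat × List Char
  | [] => (0, [])
  | d :: t => if d == c then ((pvTakeRun c t).1 + 1, (pvTakeRun c t).2) else (0, d :: t)

lemma pvTakeRun_length_le (c : Char) (t : List Char) : (pvTakeRun c t).2.length ≤ t.length := by
  induction t with
  | nil => simp [pvTakeRun]
  | cons d t ih =>
    simp only [pvTakeRun]
    split
    · exact Nat.le_succ_of_le ih
    · simp

-- outer `while i < n` of Source B: consume one maximal run, add its strings, continue on the rest
def pvScanRuns (s : PySem.Set String) : List Char → PySem.Set String
  | [] => s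
  | c :: t =>
    let p := pvTakeRun c t
    let s' := (PySem.List.pyRange 3 ((p.1 : Int) + 2) 1).foldl
        (fun acc k => PySem.Set.add acc (String.ofList (List.replicate k.toNat c))) s
    pvScanRuns s' p.2
termination_by l => l.length
decreasing_by simpa using Nat.lt_succ_of_le (pvTakeRun_length_le c t)

def get_same_letter_words_alt (word_list : List String) : List String :=
  let found : PySem.Set String :=
    word_list.foldl (fun found word => pvScanRuns found word.toList) PySem.Set.empty
  PySem.List.sorted found (fun x => x) false

-- ===== PRECONDITION & SPEC =====
def Spec_get_same_letter_words (word_list : List String) (out : List String) : Prop := out = get_same_letter_words_alt word_list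
instance (word_list : List String) (out : List String) : Decidable (Spec_get_same_letter_words word_list out) := by unfold Spec_get_same_letter_words; infer_instance

-- ===== CLAIM (what is proved, stated in full; the proofs are below) =====
def Claim_equal_get_same_letter_words : Prop := ∀ (word_list : List String), Dom_get_same_letter_words word_list → Spec_get_same_letter_words word_list (get_same_letter_words word_list)

-- ===== LEMMAS AND PROOFS =====

-- the common characterisation: x is a one-letter string of length ≥ 3 occurring contiguously in l
def pvRep (l : List Char) (x : String) : Prop :=
  ∃ c k, 3 ≤ k ∧ x = String.ofList (List.replicate k c) ∧ List.replicate k c <:+: l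

lemma mem_foldl_step {γ : Type} (step : PySem.Set String → γ → PySem.Set String)
    (Q : γ → String → Prop)
    (h : ∀ s a x, x ∈ step s a ↔ x ∈ s ∨ Q a x) :
    ∀ (L : List γ) (s : PySem.Set String) (x : String),
      x ∈ L.foldl step s ↔ x ∈ s ∨ ∃ a ∈ L, Q a x := by
  intro L
  induction L with
  | nil => simp
  | cons a L ih =>
    intro s x
    simp only [List.foldl_cons, ih, h, List.mem_cons]
    constructor
    · rintro ((hs | hq) | ⟨b, hb, hQ⟩)
      · exact Or.inl hs
      · exact Or.inr ⟨a, Or.inl rfl, hq⟩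
      · exact Or.inr ⟨b, Or.inr hb, hQ⟩
    · rintro (hs | ⟨b, (rfl | hb), hQ⟩)
      · exact Or.inl (Or.inl hs)
      · exact Or.inl (Or.inr hQ)
      · exact Or.inr ⟨b, hb, hQ⟩

lemma nodup_foldl_step {γ : Type} (step : PySem.Set String → γ → PySem.Set String)
    (h : ∀ s a, List.Nodup s → List.Nodup (step s a)) :
    ∀ (L : List γ) (s : PySem.Set String), List.Nodup s → List.Nodup (L.foldl step s) := by
  intro L
  induction L with
  | nil => exact fun s hs => hs
  | cons a L ih => intro s hs; exact ih _ (h s a hs)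

lemma foldl_add_const {α : Type} [BEq α] [LawfulBEq α] (c : α) : ∀ (m : Nat) (acc : PySem.Set α), c ∈ acc →
    List.foldl PySem.Set.add acc (List.replicate m c) = acc := by
  intro m
  induction m with
  | zero => simp
  | succ m ih =>
    intro acc hc
    simp only [List.replicate_succ, List.foldl_cons]
    rw [show PySem.Set.add acc c = acc by simp [PySem.Set.add, hc]]
    exact ih acc hc

lemma ofList_len_one_iff (xs : List Char) :
    (PySem.Set.ofList xs).length = 1 ↔ ∃ c, xs = List.replicate xs.length c ∧ xs ≠ [] := by
  constructor
  · intro h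
    obtain ⟨c, hc⟩ : ∃ c, PySem.Set.ofList xs = [c] := by
      match hl : PySem.Set.ofList xs with
      | [c] => exact ⟨c, rfl⟩
      | [] => rw [hl] at h; simp at h
      | a :: b :: t => rw [hl] at h; simp at h
    refine ⟨c, List.eq_replicate_iff.mpr ⟨rfl, fun b hb => ?_⟩, ?_⟩
    · have := (PySem.Set.mem_ofList (xs := xs) (y := b)).mpr hb
      rw [hc] at this; simpa using this
    · rintro rfl
      simp [PySem.Set.ofList] at hc
  · rintro ⟨c, hx, hne⟩
    obtain ⟨m, rfl⟩ : ∃ m, xs = List.replicate (m+1) c := by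
      refine ⟨xs.length - 1, ?_⟩
      rw [hx]; congr 1
      have := List.length_pos_iff.mpr hne
      simp; omega
    rw [PySem.Set.ofList_eq_foldl]
    rw [List.replicate_succ, List.foldl_cons,
      show PySem.Set.add ([] : PySem.Set Char) c = [c] from rfl,
      foldl_add_const c m [c] (by simp)]
    rfl

lemma rep_prefix_le (c : Char) (r : List Char) (hr : ∀ e, r.head? = some e → e ≠ c) :
    ∀ (p k : Nat), List.replicate p c <+: List.replicate k c ++ r → p ≤ k := by
  intro p
  induction p with
  | zero => simp
  | succ p ih =>
    intro k h
    cases k with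
    | zero =>
      simp only [List.replicate_zero, List.nil_append, List.replicate_succ] at h
      cases r with
      | nil => simp at h
      | cons e t =>
        rw [List.cons_prefix_cons] at h
        exact absurd h.1.symm (hr e rfl)
    | succ k =>
      rw [List.replicate_succ, List.replicate_succ, List.cons_append, List.cons_prefix_cons] at h
      exact Nat.succ_le_succ (ih k h.2)

lemma replicate_infix_run_append (c d : Char) (r : List Char)
    (hr : ∀ e, r.head? = some e → e ≠ c) :
    ∀ (k m : Nat), 1 ≤ m →
      (List.replicate m d <:+: (List.replicate k c ++ r) ↔
        (d = c ∧ m ≤ k) ∨ List.replicate m d <:+: r) := by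
  intro k
  induction k with
  | zero =>
    intro m hm
    simp only [List.replicate_zero, List.nil_append]
    constructor
    · exact Or.inr
    · rintro (⟨rfl, h⟩ | h)
      · omega
      · exact h
  | succ k ih =>
    intro m hm
    rw [List.replicate_succ, List.cons_append, List.infix_cons_iff]
    constructor
    · rintro (hpre | hinf)
      · -- replicate m d <+: c :: (replicate k c ++ r)
        cases m with
        | zero => omega
        | succ m =>
          rw [List.replicate_succ, List.cons_prefix_cons] at hpre
          obtain ⟨hdc, hpre⟩ := hpre
          subst hdc
          exact Or.inl ⟨rfl, Nat.succ_le_succ (rep_prefix_le d r hr m k hpre)⟩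
      · rcases (ih m hm).mp hinf with ⟨rfl, h⟩ | h
        · exact Or.inl ⟨rfl, Nat.le_succ_of_le h⟩
        · exact Or.inr h
    · rintro (⟨hdc, hmk⟩ | h)
      subst hdc
      · left
        have : List.replicate m d <+: List.replicate (k+1) d := by
          refine ⟨List.replicate (k+1-m) d, ?_⟩
          rw [← List.replicate_add]; congr 1; omega
        rw [List.replicate_succ] at this
        have h2 := this.trans (List.prefix_append (d :: List.replicate k d) r)
        simpa using h2
      · right
        exact h.trans (List.suffix_append _ _).isInfix

lemma pvTakeRun_spec (c : Char) (t : List Char) :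
    t = List.replicate (pvTakeRun c t).1 c ++ (pvTakeRun c t).2 ∧
      (∀ e, (pvTakeRun c t).2.head? = some e → e ≠ c) := by
  induction t with
  | nil => simp [pvTakeRun]
  | cons d t ih =>
    simp only [pvTakeRun]
    split
    · next hdc =>
      rw [beq_iff_eq] at hdc
      subst hdc
      refine ⟨?_, ih.2⟩
      conv_lhs => rw [ih.1]
      simp [List.replicate_succ]
    · next hdc =>
      rw [beq_iff_eq] at hdc
      exact ⟨by simp, by rintro e he rfl; simp at he; exact hdc he⟩

lemma pvRep_run_cons (c : Char) (t : List Char) (x : String) :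
    pvRep (c :: t) x ↔
      (∃ a ∈ PySem.List.pyRange 3 (((pvTakeRun c t).1 : Int) + 2) 1,
        x = String.ofList (List.replicate a.toNat c)) ∨ pvRep (pvTakeRun c t).2 x := by
  obtain ⟨ht, hr⟩ := pvTakeRun_spec c t
  have hct : c :: t = List.replicate ((pvTakeRun c t).1 + 1) c ++ (pvTakeRun c t).2 := by
    rw [List.replicate_succ, List.cons_append]; exact congrArg (c :: ·) ht
  constructor
  · rintro ⟨c', m, hm, rfl, hinf⟩
    rw [hct] at hinf
    rcases (replicate_infix_run_append c c' _ hr _ m (by omega)).mp hinf with ⟨rfl, hmk⟩ | h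
    · left
      refine ⟨(m : Int), ?_, by simp⟩
      rw [PySem.List.mem_pyRange_one]
      constructor <;> [exact_mod_cast hm; exact_mod_cast Nat.lt_succ_of_le hmk]
    · exact Or.inr ⟨c', m, hm, rfl, h⟩
  · rintro (⟨a, ha, rfl⟩ | ⟨c', m, hm, rfl, hinf⟩)
    · rw [PySem.List.mem_pyRange_one] at ha
      refine ⟨c, a.toNat, by omega, rfl, ?_⟩
      rw [hct]
      refine ((replicate_infix_run_append c c _ hr _ a.toNat (by omega)).mpr ?_)
      exact Or.inl ⟨rfl, by omega⟩
    · refine ⟨c', m, hm, rfl, ?_⟩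
      rw [hct]
      exact (replicate_infix_run_append c c' _ hr _ m (by omega)).mpr (Or.inr hinf)

lemma mem_pvScanRuns : ∀ (n : Nat) (l : List Char), l.length ≤ n → ∀ (s : PySem.Set String) (x : String),
    x ∈ pvScanRuns s l ↔ x ∈ s ∨ pvRep l x := by
  intro n
  induction n with
  | zero =>
    intro l hl s x
    match l with
    | [] =>
      simp only [pvScanRuns]
      constructor
      · exact Or.inl
      · rintro (hs | ⟨c, k, hk, _, hinf⟩)
        · exact hs
        · have := hinf.length_le; simp at this; omega
    | c :: t => simp at hl
  | succ n ih =>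
    intro l hl s x
    match l with
    | [] =>
      simp only [pvScanRuns]
      constructor
      · exact Or.inl
      · rintro (hs | ⟨c, k, hk, _, hinf⟩)
        · exact hs
        · have := hinf.length_le; simp at this; omega
    | c :: t =>
      simp only [pvScanRuns]
      rw [ih _ (by have := pvTakeRun_length_le c t; simp at hl; omega)]
      rw [mem_foldl_step _ (fun a x => x = String.ofList (List.replicate a.toNat c))
        (by intro s a x; rw [PySem.Set.mem_add])]
      rw [pvRep_run_cons]
      exact or_assoc


lemma nodup_pvScanRuns : ∀ (n : Nat) (l : List Char), l.length ≤ n → ∀ (s : PySem.Set String),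
    List.Nodup s → List.Nodup (pvScanRuns s l) := by
  intro n
  induction n with
  | zero =>
    intro l hl s hs
    match l with
    | [] => simpa [pvScanRuns] using hs
    | c :: t => simp at hl
  | succ n ih =>
    intro l hl s hs
    match l with
    | [] => simpa [pvScanRuns] using hs
    | c :: t =>
      simp only [pvScanRuns]
      refine ih _ (by have := pvTakeRun_length_le c t; simp at hl; omega) _ ?_
      exact nodup_foldl_step _ (fun s a h => PySem.Set.nodup_add s _ h) _ _ hs


lemma take_drop_infix {α : Type} (l : List α) (a b : Nat) : (l.drop a).take b <:+: l :=
  ((List.take_prefix b (l.drop a)).isInfix).trans (List.drop_suffix a l).isInfix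

lemma mem_A_word (l : List Char) (s : PySem.Set String) (x : String) :
    x ∈ (PySem.List.pyRange 0 ((l.length : Int) - 2) 1).foldl (fun s1 i =>
        (PySem.List.pyRange (i + 2) (l.length : Int) 1).foldl (fun s2 j =>
          if (PySem.Set.ofList (PySem.List.slice l (some i) (some (j + 1)))).length = 1 then
            PySem.Set.add s2 (String.ofList (PySem.List.slice l (some i) (some (j + 1))))
          else s2) s1) s
      ↔ x ∈ s ∨ pvRep l x := by
  rw [mem_foldl_step _ (fun i x => ∃ j ∈ PySem.List.pyRange (i + 2) (l.length : Int) 1,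
      (PySem.Set.ofList (PySem.List.slice l (some i) (some (j + 1)))).length = 1 ∧
        x = String.ofList (PySem.List.slice l (some i) (some (j + 1))))
      (by
        intro s1 i x
        rw [mem_foldl_step _ (fun j x =>
          (PySem.Set.ofList (PySem.List.slice l (some i) (some (j + 1)))).length = 1 ∧
            x = String.ofList (PySem.List.slice l (some i) (some (j + 1))))
          (by
            intro s2 j x
            split
            · next hc => rw [PySem.Set.mem_add]; tauto
            · next hc => tauto)])]
  constructor
  · rintro (hs | ⟨i, hi, j, hj, hcond, rfl⟩)
    · exact Or.inl hs
    · right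
      rw [PySem.List.mem_pyRange_one] at hi hj
      have hij : (0:Int) ≤ i ∧ i + 2 ≤ j ∧ j < l.length := ⟨hi.1, hj.1, hj.2⟩
      have h1 : (0:Int) ≤ i := hij.1
      have h2 : (0:Int) ≤ j + 1 := by omega
      rw [PySem.List.slice_toNat _ h1 h2] at hcond ⊢
      have hjn : (j+1).toNat = j.toNat + 1 := by omega
      have hlen : ((l.drop i.toNat).take ((j+1).toNat - i.toNat)).length = (j+1).toNat - i.toNat := by
        rw [List.length_take, List.length_drop]
        have : j.toNat < l.length := by omega
        omega
      obtain ⟨c, hrep, hne⟩ := (ofList_len_one_iff _).mp hcond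
      refine ⟨c, (j+1).toNat - i.toNat, by omega, ?_, ?_⟩
      · rw [hrep, hlen]
      · rw [← hlen, ← hrep]; exact take_drop_infix l _ _
  · rintro (hs | ⟨c, k, hk, rfl, pre, post, hsplit⟩)
    · exact Or.inl hs
    · right
      have hlen : l.length = pre.length + k + post.length := by
        rw [← hsplit]; simp; omega
      refine ⟨(pre.length : Int), ?_, ((pre.length + k - 1 : Nat) : Int), ?_, ?_⟩
      · rw [PySem.List.mem_pyRange_one]; omega
      · rw [PySem.List.mem_pyRange_one]; omega
      · have hb : ((pre.length + k - 1 : Nat) : Int) + 1 = ((pre.length + k : Nat) : Int) := by push_cast; omega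
        rw [hb, PySem.List.slice_natCast]
        have hdrop : l.drop pre.length = List.replicate k c ++ post := by
          rw [← hsplit, List.append_assoc, List.drop_left]
        rw [hdrop, show pre.length + k - pre.length = k by omega,
          List.take_left' (by simp)]
        refine ⟨?_, rfl⟩
        exact (ofList_len_one_iff _).mpr ⟨c, by simp, by simp; omega⟩

lemma nodup_A_word (l : List Char) (s : PySem.Set String) (hs : List.Nodup s) :
    List.Nodup ((PySem.List.pyRange 0 ((l.length : Int) - 2) 1).foldl (fun s1 i =>
        (PySem.List.pyRange (i + 2) (l.length : Int) 1).foldl (fun s2 j =>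
          if (PySem.Set.ofList (PySem.List.slice l (some i) (some (j + 1)))).length = 1 then
            PySem.Set.add s2 (String.ofList (PySem.List.slice l (some i) (some (j + 1))))
          else s2) s1) s) := by
  refine nodup_foldl_step _ (fun s1 i h1 => ?_) _ _ hs
  refine nodup_foldl_step _ (fun s2 j h2 => ?_) _ _ h1
  split
  · exact PySem.Set.nodup_add s2 _ h2
  · exact h2

-- ===== VERDICT (by name: the statement is the Claim_ definition above) =====
def pvStepA (s : PySem.Set String) (word : String) : PySem.Set String :=
  (PySem.List.pyRange 0 ((word.toList.length : Int) - 2) 1).foldl (fun s1 i =>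
    (PySem.List.pyRange (i + 2) (word.toList.length : Int) 1).foldl (fun s2 j =>
      if (PySem.Set.ofList (PySem.List.slice word.toList (some i) (some (j + 1)))).length = 1 then
        PySem.Set.add s2 (String.ofList (PySem.List.slice word.toList (some i) (some (j + 1))))
      else s2) s1) s

lemma A_eq (word_list : List String) :
    get_same_letter_words word_list =
      PySem.List.sorted (word_list.foldl pvStepA PySem.Set.empty) (fun x => x) false := rfl

lemma mem_pvStepA (s : PySem.Set String) (w : String) (x : String) :
    x ∈ pvStepA s w ↔ x ∈ s ∨ pvRep w.toList x := mem_A_word w.toList s x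

lemma nodup_pvStepA (s : PySem.Set String) (w : String) (hs : List.Nodup s) :
    List.Nodup (pvStepA s w) := nodup_A_word w.toList s hs

theorem get_same_letter_words_spec : Claim_equal_get_same_letter_words := by
  intro word_list _
  unfold Spec_get_same_letter_words get_same_letter_words_alt
  rw [A_eq word_list]
  dsimp only
  have memA := mem_foldl_step pvStepA (fun (w : String) (x : String) => pvRep w.toList x)
    mem_pvStepA word_list PySem.Set.empty
  have memB := mem_foldl_step _ (fun (w : String) (x : String) => pvRep w.toList x)
    (fun s w x => mem_pvScanRuns w.toList.length w.toList le_rfl s x) word_list PySem.Set.empty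
  have ndA := nodup_foldl_step pvStepA nodup_pvStepA word_list PySem.Set.empty List.nodup_nil
  have ndB := nodup_foldl_step _ (fun s w => nodup_pvScanRuns w.toList.length w.toList le_rfl s)
    word_list PySem.Set.empty List.nodup_nil
  refine (PySem.List.sorted_id_eq_sorted_id_iff_perm _ _).mpr ?_
  exact (List.perm_ext_iff_of_nodup ndA ndB).mpr (fun a => by rw [memA a, memB a])
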